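-- pv_equiv track=rewrite | github.com/alex3287/python-2019 | codewars/level_4/nextBigger.py | change_number
-- ===== SOURCE A (Python) =====
-- def change_number(n, A):
--     m = 10
--     R = [n]
--     for i in A:
--         if n < i < m:
--             if m < 10:
--                 R.append(m)
--             m = i
--         else:
--             R.append(i)
--     R = [m] + sorted(R)
--     return R
-- ===== SOURCE B (Python) =====
-- def change_number(n, A):
--     # filter/min/remove decomposition instead of A's fused min-tracking accumulator loop
--     bigger = [i for i in A if n < i < 10]
--     if bigger:
--         m = min(bigger)
--         R = list(A)
--         R.remove(m)
--         R.append(n)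
--     else:
--         m = 10
--         R = [n] + list(A)
--     return [m] + sorted(R)
-- ===== Notes on version B (the rewrite author's own statement) =====
-- stated objective: simpler
-- what changed: Replaced A's fused loop that tracks a running minimum while flushing displaced elements into an accumulator by separate passes: filter the candidates in (n,10), take min(), remove one occurrence from a copy, append n, and sort.
import Mathlib
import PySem

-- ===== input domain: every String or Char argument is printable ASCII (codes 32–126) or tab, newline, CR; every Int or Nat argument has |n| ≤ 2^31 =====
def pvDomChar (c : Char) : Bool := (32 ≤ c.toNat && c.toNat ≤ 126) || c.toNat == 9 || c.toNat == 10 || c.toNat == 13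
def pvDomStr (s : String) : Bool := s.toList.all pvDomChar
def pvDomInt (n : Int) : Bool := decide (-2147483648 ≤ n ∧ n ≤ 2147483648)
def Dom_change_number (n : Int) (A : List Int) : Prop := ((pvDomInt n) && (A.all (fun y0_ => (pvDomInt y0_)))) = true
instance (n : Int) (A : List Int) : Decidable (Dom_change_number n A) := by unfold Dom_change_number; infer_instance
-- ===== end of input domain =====

-- B replaces A's fused min-tracking accumulator loop by separate filter/min/remove/sort passes (objective: simpler).

-- ===== PORT A =====
-- one step of A's for-loop: state is (m, R)
def stepA (n : Int) (st : Int × List Int) (i : Int) : Int × List Int :=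
  if n < i ∧ i < st.1 then
    (i, if st.1 < 10 then st.2 ++ [st.1] else st.2)
  else
    (st.1, st.2 ++ [i])

def change_number (n : Int) (A : List Int) : List Int :=
  let s := A.foldl (stepA n) ((10 : Int), [n])
  s.1 :: PySem.List.sorted s.2 (fun x => x) false

-- ===== PORT B =====
def change_number_alt (n : Int) (A : List Int) : List Int :=
  let bigger := A.filter (fun i => decide (n < i ∧ i < 10))
  match PySem.List.min? bigger (fun x => x) with
  | some m =>
      -- R = list(A); R.remove(m); R.append(n)  (m ∈ A always, so remove? is some)
      m :: PySem.List.sorted (((PySem.List.remove? A m).getD A) ++ [n]) (fun x => x) false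
  | none =>
      10 :: PySem.List.sorted (n :: A) (fun x => x) false

-- ===== PRECONDITION & SPEC =====
def Spec_change_number (n : Int) (A : List Int) (out : List Int) : Prop := out = change_number_alt n A
instance (n : Int) (A : List Int) (out : List Int) : Decidable (Spec_change_number n A out) := by unfold Spec_change_number; infer_instance

-- ===== CLAIM (what is proved, stated in full; the proofs are below) =====
def Claim_equal_change_number : Prop := ∀ (n : Int) (A : List Int), Dom_change_number n A → Spec_change_number n A (change_number n A)

-- ===== LEMMAS AND PROOFS =====

-- the first component of A's fold is the running min of the candidates in (n, m)
def runMin (n m0 : Int) (l : List Int) : Int :=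
  l.foldl (fun m i => if n < i ∧ i < m then i else m) m0

theorem foldA_fst (n : Int) : ∀ (l : List Int) (m0 : Int) (R0 : List Int),
    (l.foldl (stepA n) (m0, R0)).1 = runMin n m0 l := by
  intro l
  induction l with
  | nil => intro m0 R0; simp [runMin]
  | cons i t ih =>
      intro m0 R0
      simp only [List.foldl, runMin, stepA]
      by_cases h : n < i ∧ i < m0 <;> simp [h, ih, runMin]

theorem runMin_le (n : Int) : ∀ (l : List Int) (m0 : Int), runMin n m0 l ≤ m0 := by
  intro l
  induction l with
  | nil => intro m0; simp [runMin]
  | cons i t ih =>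
      intro m0
      simp only [runMin, List.foldl]
      by_cases h : n < i ∧ i < m0
      · simpa [runMin, h] using le_trans (ih i) (le_of_lt h.2)
      · simpa [runMin, h] using ih m0

theorem runMin_eq_min_fold (n : Int) : ∀ (l : List Int) (m0 : Int),
    runMin n m0 l = l.foldl (fun m i => if n < i then min m i else m) m0 := by
  intro l
  induction l with
  | nil => intro m0; simp [runMin]
  | cons i t ih =>
      intro m0
      simp only [runMin, List.foldl]
      by_cases h1 : n < i
      · by_cases h2 : i < m0
        · simp only [runMin] at ih
          rw [if_pos ⟨h1, h2⟩, if_pos h1, ih, min_eq_right (le_of_lt h2)]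
        · have : ¬ (n < i ∧ i < m0) := by tauto
          simp only [runMin] at ih
          rw [if_neg this, if_pos h1, ih, min_eq_left (le_of_not_gt h2)]
      · have : ¬ (n < i ∧ i < m0) := by tauto
        simp only [runMin] at ih
        rw [if_neg this, if_neg h1, ih]

theorem min_fold_filter (n : Int) : ∀ (l : List Int) (m0 : Int),
    l.foldl (fun m i => if n < i then min m i else m) m0
      = (l.filter (fun i => decide (n < i))).foldl min m0 := by
  intro l
  induction l with
  | nil => intro m0; simp
  | cons i t ih =>
      intro m0
      by_cases h : n < i <;> simp [h, ih]

-- elements ≥ 10 never lower a min that starts ≤ 10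
theorem min_fold_drop_ge10 (n : Int) : ∀ (l : List Int) (m0 : Int), m0 ≤ 10 →
    (l.filter (fun i => decide (n < i))).foldl min m0
      = (l.filter (fun i => decide (n < i ∧ i < 10))).foldl min m0 := by
  intro l
  induction l with
  | nil => intro m0 _; simp
  | cons i t ih =>
      intro m0 hm0
      by_cases h1 : n < i
      · by_cases h2 : i < 10
        · simp [h1, h2, ih (min m0 i) (le_trans (min_le_left _ _) hm0)]
        · have hmin : min m0 i = m0 := min_eq_left (le_trans hm0 (le_of_not_gt h2))
          simp [h1, h2, hmin, ih m0 hm0]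
      · simp [h1, ih m0 hm0]

-- multiset invariant of A's loop: the accumulator plus the (possibly dropped) final min
-- is a permutation of the initial accumulator, the input, and the (possibly flushed) initial min
theorem foldA_perm (n : Int) : ∀ (l : List Int) (m0 : Int) (R0 : List Int), m0 ≤ 10 →
    ((l.foldl (stepA n) (m0, R0)).2
        ++ (if runMin n m0 l < m0 then [runMin n m0 l] else [])).Perm
      (R0 ++ l ++ (if runMin n m0 l < m0 ∧ m0 < 10 then [m0] else [])) := by
  intro l
  induction l with
  | nil => intro m0 R0 _; simp [runMin]
  | cons i t ih =>
      intro m0 R0 hm0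
      by_cases h : n < i ∧ i < m0
      · have hi10 : i < 10 := lt_of_lt_of_le h.2 hm0
        have hMi : runMin n i t ≤ i := runMin_le n t i
        have hMm0 : runMin n i t < m0 := lt_of_le_of_lt hMi h.2
        have hstep : (i :: t).foldl (stepA n) (m0, R0)
            = t.foldl (stepA n) (i, if m0 < 10 then R0 ++ [m0] else R0) := by
          simp [List.foldl, stepA, h]
        have hfst : runMin n m0 (i :: t) = runMin n i t := by
          simp [runMin, List.foldl, h]
        have hQ := ih i (if m0 < 10 then R0 ++ [m0] else R0) (le_of_lt hi10)
        rw [hstep, hfst]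
        rw [List.perm_iff_count] at hQ ⊢
        intro a
        have hQa := hQ a
        by_cases h10 : m0 < 10 <;> by_cases hlt : runMin n i t < i
        · simp [h10, hlt, hMm0, hi10, List.count_append, List.count_cons] at hQa ⊢
          omega
        · have hMeq : runMin n i t = i := le_antisymm hMi (le_of_not_gt hlt)
          simp [h10, hMeq, h.2, List.count_append, List.count_cons] at hQa ⊢
          omega
        · simp [h10, hlt, hMm0, hi10, List.count_append, List.count_cons] at hQa ⊢
          omega
        · have hMeq : runMin n i t = i := le_antisymm hMi (le_of_not_gt hlt)
          simp [h10, hMeq, h.2, List.count_append, List.count_cons] at hQa ⊢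
          omega
      · have hstep : (i :: t).foldl (stepA n) (m0, R0)
            = t.foldl (stepA n) (m0, R0 ++ [i]) := by
          simp [List.foldl, stepA, h]
        have hfst : runMin n m0 (i :: t) = runMin n m0 t := by
          simp [runMin, List.foldl, h]
        have hQ := ih m0 (R0 ++ [i]) hm0
        rw [hstep, hfst]
        rw [List.perm_iff_count] at hQ ⊢
        intro a
        have hQa := hQ a
        by_cases hlt : runMin n m0 t < m0 <;> by_cases h10 : m0 < 10 <;>
          simp [hlt, h10, List.count_append, List.count_cons] at hQa ⊢ <;> omega

-- ===== VERDICT (by name: the statement is the Claim_ definition above) =====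
theorem change_number_spec : Claim_equal_change_number := by
  intro n A _
  show change_number n A = change_number_alt n A
  simp only [change_number, change_number_alt]
  have hfst := foldA_fst n A 10 [n]
  have hM : runMin n 10 A = (A.filter (fun i => decide (n < i ∧ i < 10))).foldl min 10 := by
    rw [runMin_eq_min_fold, min_fold_filter, min_fold_drop_ge10 n A 10 le_rfl]
  have hperm := foldA_perm n A 10 [n] le_rfl
  rcases hbig : A.filter (fun i => decide (n < i ∧ i < 10)) with _ | ⟨x, t⟩
  · -- no candidate: m = 10 on both sides
    have hM10 : runMin n 10 A = 10 := by rw [hM, hbig]; rfl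
    rw [hM10] at hperm
    simp only [lt_irrefl] at hperm
    simp at hperm
    have hs : PySem.List.sorted (A.foldl (stepA n) (10, [n])).2 (fun x => x) false
        = PySem.List.sorted (n :: A) (fun x => x) false :=
      PySem.List.sorted_eq_sorted_of_perm _ _ _ (fun a b hab => hab) (by simpa using hperm)
    simp [PySem.List.min?, hfst, hM10, hs]
  · -- candidates exist: m = min(bigger) < 10
    rw [hbig] at hM
    have hx : x ∈ A.filter (fun i => decide (n < i ∧ i < 10)) := by
      rw [hbig]; exact List.mem_cons_self
    have hx10 : x < 10 := by
      have := List.of_mem_filter hx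
      simp at this; exact this.2
    have hsome : (PySem.List.min? (x :: t) fun x => x) = some (List.foldl min x t) :=
      PySem.List.min?_id_cons x t
    have hMval : runMin n 10 A = List.foldl min x t := by
      rw [hM]
      simp only [List.foldl]
      rw [min_eq_right (le_of_lt hx10)]
    have hm_le_x : List.foldl min x t ≤ x := (PySem.List.foldl_min_le t x).1
    have hm10 : List.foldl min x t < 10 := lt_of_le_of_lt hm_le_x hx10
    have hmemb : List.foldl min x t ∈ A.filter (fun i => decide (n < i ∧ i < 10)) := by
      rw [hbig]
      rcases PySem.List.foldl_min_mem t x with hh | hh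
      · rw [hh]; exact List.mem_cons_self
      · exact List.mem_cons_of_mem _ hh
    have hmA : List.foldl min x t ∈ A := List.mem_of_mem_filter hmemb
    have hrem : PySem.List.remove? A (List.foldl min x t) = some (A.erase (List.foldl min x t)) :=
      PySem.List.remove?_eq_some_erase A _ hmA
    rw [hMval] at hperm
    rw [if_pos hm10, if_neg (by omega : ¬ (List.foldl min x t < 10 ∧ (10:Int) < 10))] at hperm
    have herase : A.Perm (List.foldl min x t :: A.erase (List.foldl min x t)) :=
      List.perm_cons_erase hmA
    have hp2 : ((A.foldl (stepA n) (10, [n])).2).Perm (A.erase (List.foldl min x t) ++ [n]) := by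
      rw [List.perm_iff_count]
      intro a
      have h1 := hperm.count_eq a
      have h2 := herase.count_eq a
      simp [List.count_append, List.count_cons] at h1 h2 ⊢
      omega
    have hs : PySem.List.sorted (A.foldl (stepA n) (10, [n])).2 (fun x => x) false
        = PySem.List.sorted (A.erase (List.foldl min x t) ++ [n]) (fun x => x) false :=
      PySem.List.sorted_eq_sorted_of_perm _ _ _ (fun a b hab => hab) hp2
    rw [hsome]
    simp [hfst, hMval, hrem, hs]
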